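-- pv_equiv track=rewrite | github.com/luscadev1/Projeto-para-N2 | main.py | relatorio_diario_acessos
-- ===== SOURCE A (Python) =====
-- def relatorio_diario_acessos(logs):
--     relatorio = {}
--     for log in logs:
--         data_acesso = log[0]
--         if data_acesso in relatorio:
--             relatorio[data_acesso] += 1
--         else:
--             relatorio[data_acesso] = 1
--     return relatorio
-- ===== SOURCE B (Python) =====
-- def relatorio_diario_acessos(logs):
--     dates = [log[0] for log in logs]
--     return {d: dates.count(d) for d in dict.fromkeys(dates)}
-- ===== Notes on version B (the rewrite author's own statement) =====
-- stated objective: alternative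
-- what changed: Replaces the single-pass incremental dict accumulation with a two-phase plan: extract the list of dates, dedup it in first-occurrence order, and count each distinct date with a separate full-list count.
import Mathlib
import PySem

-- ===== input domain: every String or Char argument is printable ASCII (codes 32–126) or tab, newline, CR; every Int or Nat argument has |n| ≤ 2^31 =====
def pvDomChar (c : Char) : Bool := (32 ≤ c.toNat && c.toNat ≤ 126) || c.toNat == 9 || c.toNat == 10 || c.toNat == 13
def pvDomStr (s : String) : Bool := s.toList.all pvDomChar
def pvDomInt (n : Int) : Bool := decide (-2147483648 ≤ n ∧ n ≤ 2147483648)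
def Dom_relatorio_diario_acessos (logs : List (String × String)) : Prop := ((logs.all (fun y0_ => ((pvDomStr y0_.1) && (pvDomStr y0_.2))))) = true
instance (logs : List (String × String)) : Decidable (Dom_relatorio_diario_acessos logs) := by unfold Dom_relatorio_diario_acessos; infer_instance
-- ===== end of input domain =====

-- B replaces A's single-pass incremental dict accumulation with dedup-the-dates-then-count-each (alternative decomposition, same results).
-- ===== PORT A =====
-- literal port of A: incremental dict accumulation ('relatorio[d] += 1' / '= 1')
def relatorio_diario_acessos (logs : List (String × String)) : List (String × Int) :=
  (logs.foldl
    (fun (relatorio : PySem.Dict String Int) log =>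
      if relatorio.contains log.1 then
        relatorio.insert log.1 (relatorio.getD log.1 0 + 1)  -- lookup guarded by 'in', so getD _ 0 = the stored value
      else
        relatorio.insert log.1 1)
    PySem.Dict.empty).items

-- ===== PORT B =====
-- literal port of B: dates list, ordered dedup (dict.fromkeys), one full count per distinct date
def relatorio_diario_acessos_alt (logs : List (String × String)) : List (String × Int) :=
  let dates := logs.map (fun log => log.1)
  (PySem.List.dedup dates).map (fun d => (d, (dates.count d : Int)))

-- ===== PRECONDITION & SPEC =====
def Spec_relatorio_diario_acessos (logs : List (String × String)) (out : List (String × Int)) : Prop := out = relatorio_diario_acessos_alt logs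
instance (logs : List (String × String)) (out : List (String × Int)) : Decidable (Spec_relatorio_diario_acessos logs out) := by unfold Spec_relatorio_diario_acessos; infer_instance

-- ===== CLAIM (what is proved, stated in full; the proofs are below) =====
def Claim_equal_relatorio_diario_acessos : Prop := ∀ (logs : List (String × String)), Dom_relatorio_diario_acessos logs → Spec_relatorio_diario_acessos logs (relatorio_diario_acessos logs)

-- ===== LEMMAS AND PROOFS =====

-- A's loop body equals the Counter update step: when the key is absent, getD _ 0 is 0.
lemma relA_step (rel : PySem.Dict String Int) (k : String) :
    (if rel.contains k then rel.insert k (rel.getD k 0 + 1) else rel.insert k 1)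
      = rel.insert k (rel.getD k 0 + 1) := by
  by_cases h : rel.contains k = true
  · simp [h]
  · have h0 : rel.contains k = false := by simpa using h
    have hg : rel.getD k 0 = 0 := by rw [PySem.Dict.getD_of_not_contains]; exact h0
    simp [h0, hg]

-- A's whole loop IS collections.Counter of the dates.
lemma relA_fold_eq_counter (logs : List (String × String)) :
    logs.foldl
      (fun (relatorio : PySem.Dict String Int) log =>
        if relatorio.contains log.1 then relatorio.insert log.1 (relatorio.getD log.1 0 + 1)
        else relatorio.insert log.1 1) PySem.Dict.empty
      = PySem.Dict.counter (logs.map (fun log => log.1)) := by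
  have hf : (fun (relatorio : PySem.Dict String Int) (log : String × String) =>
        if relatorio.contains log.1 then relatorio.insert log.1 (relatorio.getD log.1 0 + 1)
        else relatorio.insert log.1 1)
      = fun relatorio log => relatorio.insert log.1 (relatorio.getD log.1 0 + 1) :=
    funext fun rel => funext fun log => relA_step rel log.1
  rw [hf, ← PySem.Dict.foldl_insert_getD_add_one_eq_counter, List.foldl_map]

-- ===== VERDICT (by name: the statement is the Claim_ definition above) =====
theorem relatorio_diario_acessos_spec : Claim_equal_relatorio_diario_acessos := by
  intro logs _
  unfold Spec_relatorio_diario_acessos relatorio_diario_acessos relatorio_diario_acessos_alt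
  rw [relA_fold_eq_counter, PySem.Dict.items_counter]
  simp
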